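-- pv_equiv track=rewrite | github.com/Anushatech91/architecture | ai_mermaid_agent.py | _fallback_mermaid_generation
-- ===== SOURCE A (Python) =====
-- def _fallback_mermaid_generation(components: dict, relationships: list) -> str:
--     """Fallback Mermaid generation using templates"""
--     lines = ["flowchart TB"]
--
--     # Group components by type
--     gateways = [name for name, type_ in components.items() if type_ == 'gateway']
--     services = [name for name, type_ in components.items() if type_ in ['service', 'auth']]
--     data = [name for name, type_ in components.items() if type_ in ['database', 'cache', 'queue']]
--     frontends = [name for name, type_ in components.items() if type_ == 'frontend']
--
--     # Add subgraphs
--     if gateways: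
--         lines.append("    subgraph Gateway_Layer")
--         for comp in gateways:
--             lines.append(f'        {comp}["{comp}"]')
--         lines.append("    end")
--
--     if frontends:
--         lines.append("    subgraph Frontend_Layer")
--         for comp in frontends:
--             lines.append(f'        {comp}["{comp}"]')
--         lines.append("    end")
--
--     if services:
--         lines.append("    subgraph Service_Layer")
--         for comp in services:
--             lines.append(f'        {comp}["{comp}"]')
--         lines.append("    end")
--
--     if data:
--         lines.append("    subgraph Data_Layer")
--         for comp in data:
--             lines.append(f'        {comp}["{comp}"]')
--         lines.append("    end")
--
--     # Add relationships
--     for rel in relationships: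
--         if 'from' in rel and 'to' in rel:
--             lines.append(f'    {rel["from"]} --> {rel["to"]}')
--
--     return '\n'.join(lines)
-- ===== SOURCE B (Python) =====
-- def _fallback_mermaid_generation(components: dict, relationships: list) -> str:
--     """Fallback Mermaid generation: stable sort by layer rank, then one scan
--     emitting a subgraph block whenever the rank changes (sort-then-scan)."""
--     LAYER = {'gateway': (0, 'Gateway_Layer'), 'frontend': (1, 'Frontend_Layer'),
--              'service': (2, 'Service_Layer'), 'auth': (2, 'Service_Layer'),
--              'database': (3, 'Data_Layer'), 'cache': (3, 'Data_Layer'),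
--              'queue': (3, 'Data_Layer')}
--     keyed = [(LAYER[t], n) for n, t in components.items() if t in LAYER]
--     keyed.sort(key=lambda x: x[0][0])  # stable: dict order kept within a layer
--
--     lines = ["flowchart TB"]
--     prev = None
--     for (rank, layer), name in keyed:
--         if prev != rank:
--             if prev is not None:
--                 lines.append("    end")
--             lines.append(f"    subgraph {layer}")
--             prev = rank
--         lines.append(f'        {name}["{name}"]')
--     if prev is not None:
--         lines.append("    end")
--
--     for rel in relationships:
--         if 'from' in rel and 'to' in rel:
--             lines.append(f'    {rel["from"]} --> {rel["to"]}')
--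
--     return '\n'.join(lines)
-- ===== Notes on version B (the rewrite author's own statement) =====
-- stated objective: alternative
-- what changed: Replaces A's four separate comprehension scans and four copy-pasted subgraph blocks with a sort-then-scan algorithm: components are tagged with a layer rank via a lookup table, stably sorted by rank (preserving dict order within each layer), and a single scan emits a subgraph block whenever the rank changes; the relationships loop is unchanged.
import Mathlib
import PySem

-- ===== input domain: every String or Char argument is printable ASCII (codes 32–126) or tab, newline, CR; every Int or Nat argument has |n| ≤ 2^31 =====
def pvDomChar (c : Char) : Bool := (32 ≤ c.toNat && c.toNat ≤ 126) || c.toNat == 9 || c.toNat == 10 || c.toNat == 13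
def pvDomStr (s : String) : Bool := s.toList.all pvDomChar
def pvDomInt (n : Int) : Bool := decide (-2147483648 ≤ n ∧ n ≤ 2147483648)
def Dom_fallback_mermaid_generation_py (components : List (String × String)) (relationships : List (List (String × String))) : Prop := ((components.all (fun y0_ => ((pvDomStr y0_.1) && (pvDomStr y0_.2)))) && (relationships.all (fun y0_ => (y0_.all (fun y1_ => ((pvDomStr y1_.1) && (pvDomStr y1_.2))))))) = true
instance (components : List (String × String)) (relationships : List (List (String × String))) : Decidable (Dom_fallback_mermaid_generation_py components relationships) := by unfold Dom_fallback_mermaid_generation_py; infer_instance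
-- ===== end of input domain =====

-- B replaces A's four comprehension scans and four copy-pasted subgraph blocks by a
-- stable sort of the components by layer rank followed by ONE scan that opens a new
-- subgraph whenever the rank changes (objective: alternative, same asymptotic cost).

-- ===== PORT A =====
-- A's f-string for a component line
def pvCompLine (c : String) : String := "        " ++ c ++ "[\"" ++ c ++ "\"]"

-- A's relationships loop body (shared shape of the unchanged final loop in both Pythons)
def pvRelStep (acc : List String) (rel : List (String × String)) : List String :=
  let d := PySem.Dict.ofList rel
  if d.contains "from" && d.contains "to" then
    acc ++ ["    " ++ d.getD "from" "" ++ " --> " ++ d.getD "to" ""]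
  else acc

def fallback_mermaid_generation_py (components : List (String × String)) (relationships : List (List (String × String))) : String :=
  let items := (PySem.Dict.ofList components).items
  let lines : List String := ["flowchart TB"]
  let gateways := (items.filter (fun p => p.2 == "gateway")).map (·.1)
  let services := (items.filter (fun p => p.2 == "service" || p.2 == "auth")).map (·.1)
  let data := (items.filter (fun p => p.2 == "database" || p.2 == "cache" || p.2 == "queue")).map (·.1)
  let frontends := (items.filter (fun p => p.2 == "frontend")).map (·.1)
  let lines := if gateways = [] then lines else
    lines ++ "    subgraph Gateway_Layer" :: gateways.map pvCompLine ++ ["    end"]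
  let lines := if frontends = [] then lines else
    lines ++ "    subgraph Frontend_Layer" :: frontends.map pvCompLine ++ ["    end"]
  let lines := if services = [] then lines else
    lines ++ "    subgraph Service_Layer" :: services.map pvCompLine ++ ["    end"]
  let lines := if data = [] then lines else
    lines ++ "    subgraph Data_Layer" :: data.map pvCompLine ++ ["    end"]
  let lines := relationships.foldl pvRelStep lines
  PySem.Str.join "\n" lines

-- ===== PORT B =====
-- Source B's LAYER table: type → (rank, layer name); none = type not in LAYER
def pvLayerOf (t : String) : Option (Int × String) :=
  if t == "gateway" then some (0, "Gateway_Layer")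
  else if t == "frontend" then some (1, "Frontend_Layer")
  else if t == "service" || t == "auth" then some (2, "Service_Layer")
  else if t == "database" || t == "cache" || t == "queue" then some (3, "Data_Layer")
  else none

-- Source B's 'if prev is not None: lines.append("    end")'
def pvClose (p : Option Int) (acc : List String) : List String :=
  match p with
  | none => acc
  | some _ => acc ++ ["    end"]

-- Source B's scan loop body: state = (lines, prev)
def pvScanStep (st : List String × Option Int) (x : (Int × String) × String) :
    List String × Option Int :=
  if st.2 = some x.1.1 then (st.1 ++ [pvCompLine x.2], st.2)
  else (pvClose st.2 st.1 ++ ["    subgraph " ++ x.1.2, pvCompLine x.2], some x.1.1)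

def fallback_mermaid_generation_py_alt (components : List (String × String)) (relationships : List (List (String × String))) : String :=
  let items := (PySem.Dict.ofList components).items
  let keyed := items.filterMap (fun p => (pvLayerOf p.2).map (fun rl => (rl, p.1)))
  let keyed := PySem.List.sorted keyed (fun x => x.1.1)
  let st := keyed.foldl pvScanStep (["flowchart TB"], none)
  let lines := pvClose st.2 st.1
  let lines := relationships.foldl pvRelStep lines
  PySem.Str.join "\n" lines

-- ===== PRECONDITION & SPEC =====
def Spec_fallback_mermaid_generation_py (components : List (String × String)) (relationships : List (List (String × String))) (out : String) : Prop := out = fallback_mermaid_generation_py_alt components relationships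
instance (components : List (String × String)) (relationships : List (List (String × String))) (out : String) : Decidable (Spec_fallback_mermaid_generation_py components relationships out) := by unfold Spec_fallback_mermaid_generation_py; infer_instance

-- ===== CLAIM =====
def Claim_equal_fallback_mermaid_generation_py : Prop := ∀ (components : List (String × String)) (relationships : List (List (String × String))), Dom_fallback_mermaid_generation_py components relationships → Spec_fallback_mermaid_generation_py components relationships (fallback_mermaid_generation_py components relationships)

-- ===== LEMMAS AND PROOFS =====
-- insertBy skips a prefix it does not go before
theorem pv_insert_skip {α : Type} (before : α → α → Bool) (x : α) (as bs : List α)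
    (h : ∀ y ∈ as, before x y = false) :
    PySem.List.insertBy before x (as ++ bs) = as ++ PySem.List.insertBy before x bs := by
  induction as with
  | nil => simp
  | cons a as ih =>
    have ha : before x a = false := h a (by simp)
    simp [PySem.List.insertBy, ha, ih (fun y hy => h y (by simp [hy]))]

-- insertBy lands at the front of a block it goes before entirely
theorem pv_insert_front {α : Type} (before : α → α → Bool) (x : α) (bs : List α)
    (h : ∀ y ∈ bs, before x y = true) :
    PySem.List.insertBy before x bs = x :: bs := by
  cases bs with
  | nil => simp [PySem.List.insertBy]
  | cons b bs => simp [PySem.List.insertBy, h b (by simp)]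

-- the stable sort by rank is the concatenation of the four rank groups, in order
theorem pv_sorted_groups (xs : List ((Int × String) × String))
    (h : ∀ e ∈ xs, e.1.1 = 0 ∨ e.1.1 = 1 ∨ e.1.1 = 2 ∨ e.1.1 = 3) :
    PySem.List.sorted xs (fun e => e.1.1) =
      xs.filter (fun e => e.1.1 == 0) ++ xs.filter (fun e => e.1.1 == 1) ++
      xs.filter (fun e => e.1.1 == 2) ++ xs.filter (fun e => e.1.1 == 3) := by
  rw [PySem.List.sorted_eq_foldl_insertBy]
  suffices aux : ∀ (ys : List ((Int × String) × String)) (a0 a1 a2 a3 : List ((Int × String) × String)),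
      (∀ e ∈ ys, e.1.1 = 0 ∨ e.1.1 = 1 ∨ e.1.1 = 2 ∨ e.1.1 = 3) →
      (∀ e ∈ a0, e.1.1 = 0) → (∀ e ∈ a1, e.1.1 = 1) →
      (∀ e ∈ a2, e.1.1 = 2) → (∀ e ∈ a3, e.1.1 = 3) →
      ys.foldl (fun acc x => PySem.List.insertBy (fun a b => decide (a.1.1 < b.1.1)) x acc)
          (a0 ++ a1 ++ a2 ++ a3) =
        (a0 ++ ys.filter (fun e => e.1.1 == 0)) ++ (a1 ++ ys.filter (fun e => e.1.1 == 1)) ++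
        (a2 ++ ys.filter (fun e => e.1.1 == 2)) ++ (a3 ++ ys.filter (fun e => e.1.1 == 3)) by
    simpa using aux xs [] [] [] [] h (by simp) (by simp) (by simp) (by simp)
  intro ys
  induction ys with
  | nil => intro a0 a1 a2 a3 _ _ _ _ _; simp
  | cons e ys ih =>
    intro a0 a1 a2 a3 hy h0 h1 h2 h3
    have he := hy e (by simp)
    have hys : ∀ e ∈ ys, e.1.1 = 0 ∨ e.1.1 = 1 ∨ e.1.1 = 2 ∨ e.1.1 = 3 :=
      fun x hx => hy x (by simp [hx])
    rcases he with hr | hr | hr | hr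
    · -- rank 0: goes before every element of a1 ++ a2 ++ a3, after a0
      have hins : PySem.List.insertBy (fun a b => decide (a.1.1 < b.1.1)) e
          (a0 ++ a1 ++ a2 ++ a3) = a0 ++ (e :: (a1 ++ a2 ++ a3)) := by
        rw [show a0 ++ a1 ++ a2 ++ a3 = a0 ++ (a1 ++ a2 ++ a3) by simp,
            pv_insert_skip _ _ _ _ (by intro y hy'; simp [h0 y hy', hr]),
            pv_insert_front]
        intro y hy'
        rcases List.mem_append.1 hy' with hy'' | hy''
        · rcases List.mem_append.1 hy'' with hy3 | hy3
          · simp [h1 y hy3, hr]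
          · simp [h2 y hy3, hr]
        · simp [h3 y hy'', hr]
      have := ih (a0 ++ [e]) a1 a2 a3 hys
        (by intro y hy'; rcases List.mem_append.1 hy' with hy'' | hy''
            · exact h0 y hy''
            · simp at hy''; simp [hy'', hr]) h1 h2 h3
      simp only [List.foldl_cons, hins]
      rw [show a0 ++ (e :: (a1 ++ a2 ++ a3)) = (a0 ++ [e]) ++ a1 ++ a2 ++ a3 by simp, this]
      simp [List.filter_cons, hr]
    · -- rank 1
      have hins : PySem.List.insertBy (fun a b => decide (a.1.1 < b.1.1)) e
          (a0 ++ a1 ++ a2 ++ a3) = (a0 ++ a1) ++ (e :: (a2 ++ a3)) := by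
        rw [show a0 ++ a1 ++ a2 ++ a3 = (a0 ++ a1) ++ (a2 ++ a3) by simp,
            pv_insert_skip _ _ _ _ (by
              intro y hy'
              rcases List.mem_append.1 hy' with hy'' | hy''
              · simp [h0 y hy'', hr]
              · simp [h1 y hy'', hr]),
            pv_insert_front]
        intro y hy'
        rcases List.mem_append.1 hy' with hy'' | hy''
        · simp [h2 y hy'', hr]
        · simp [h3 y hy'', hr]
      have := ih a0 (a1 ++ [e]) a2 a3 hys h0
        (by intro y hy'; rcases List.mem_append.1 hy' with hy'' | hy''
            · exact h1 y hy''
            · simp at hy''; simp [hy'', hr]) h2 h3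
      simp only [List.foldl_cons, hins]
      rw [show (a0 ++ a1) ++ (e :: (a2 ++ a3)) = a0 ++ (a1 ++ [e]) ++ a2 ++ a3 by simp, this]
      simp [List.filter_cons, hr]
    · -- rank 2
      have hins : PySem.List.insertBy (fun a b => decide (a.1.1 < b.1.1)) e
          (a0 ++ a1 ++ a2 ++ a3) = (a0 ++ a1 ++ a2) ++ (e :: a3) := by
        rw [show a0 ++ a1 ++ a2 ++ a3 = (a0 ++ a1 ++ a2) ++ a3 by simp,
            pv_insert_skip _ _ _ _ (by
              intro y hy'
              rcases List.mem_append.1 hy' with hy'' | hy''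
              · rcases List.mem_append.1 hy'' with hy3 | hy3
                · simp [h0 y hy3, hr]
                · simp [h1 y hy3, hr]
              · simp [h2 y hy'', hr]),
            pv_insert_front]
        intro y hy'
        simp [h3 y hy', hr]
      have := ih a0 a1 (a2 ++ [e]) a3 hys h0 h1
        (by intro y hy'; rcases List.mem_append.1 hy' with hy'' | hy''
            · exact h2 y hy''
            · simp at hy''; simp [hy'', hr]) h3
      simp only [List.foldl_cons, hins]
      rw [show (a0 ++ a1 ++ a2) ++ (e :: a3) = a0 ++ a1 ++ (a2 ++ [e]) ++ a3 by simp, this]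
      simp [List.filter_cons, hr]
    · -- rank 3: after everything
      have hins : PySem.List.insertBy (fun a b => decide (a.1.1 < b.1.1)) e
          (a0 ++ a1 ++ a2 ++ a3) = a0 ++ a1 ++ a2 ++ (a3 ++ [e]) := by
        rw [show a0 ++ a1 ++ a2 ++ a3 = (a0 ++ a1 ++ a2 ++ a3) ++ [] by simp] -- dummy
        rw [PySem.List.insertBy_of_forall_not_before]
        · simp
        · intro y hy'
          simp only [List.append_nil] at hy'
          rcases List.mem_append.1 hy' with hy'' | hy''
          · rcases List.mem_append.1 hy'' with hy3 | hy3
            · rcases List.mem_append.1 hy3 with hy4 | hy4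
              · simp [h0 y hy4, hr]
              · simp [h1 y hy4, hr]
            · simp [h2 y hy3, hr]
          · simp [h3 y hy'', hr]
      have := ih a0 a1 a2 (a3 ++ [e]) hys h0 h1 h2
        (by intro y hy'; rcases List.mem_append.1 hy' with hy'' | hy''
            · exact h3 y hy''
            · simp at hy''; simp [hy'', hr])
      simp only [List.foldl_cons, hins, this]
      simp [List.filter_cons, hr]

-- every element of B's keyed list has rank 0, 1, 2 or 3
theorem pv_keyed_ranks (items : List (String × String)) :
    ∀ e ∈ items.filterMap (fun p => (pvLayerOf p.2).map (fun rl => (rl, p.1))),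
      e.1.1 = 0 ∨ e.1.1 = 1 ∨ e.1.1 = 2 ∨ e.1.1 = 3 := by
  intro e he
  simp only [List.mem_filterMap, Option.map_eq_some_iff] at he
  obtain ⟨p, _, rl, hrl, rfl⟩ := he
  unfold pvLayerOf at hrl
  split_ifs at hrl <;> (injection hrl with h'; subst h'; simp)

-- the four rank-filters of B's keyed list are A's four name lists, tagged
theorem pv_keyed_filters (items : List (String × String)) :
    (items.filterMap (fun p => (pvLayerOf p.2).map (fun rl => (rl, p.1)))).filter
        (fun e => e.1.1 == 0) =
      (((items.filter (fun p => p.2 == "gateway")).map (·.1)).map (fun n => (((0:Int), "Gateway_Layer"), n))) ∧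
    (items.filterMap (fun p => (pvLayerOf p.2).map (fun rl => (rl, p.1)))).filter
        (fun e => e.1.1 == 1) =
      (((items.filter (fun p => p.2 == "frontend")).map (·.1)).map (fun n => (((1:Int), "Frontend_Layer"), n))) ∧
    (items.filterMap (fun p => (pvLayerOf p.2).map (fun rl => (rl, p.1)))).filter
        (fun e => e.1.1 == 2) =
      (((items.filter (fun p => p.2 == "service" || p.2 == "auth")).map (·.1)).map (fun n => (((2:Int), "Service_Layer"), n))) ∧
    (items.filterMap (fun p => (pvLayerOf p.2).map (fun rl => (rl, p.1)))).filter
        (fun e => e.1.1 == 3) =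
      (((items.filter (fun p => p.2 == "database" || p.2 == "cache" || p.2 == "queue")).map (·.1)).map (fun n => (((3:Int), "Data_Layer"), n))) := by
  induction items with
  | nil => simp
  | cons p rest ih =>
    obtain ⟨ih0, ih1, ih2, ih3⟩ := ih
    by_cases hg : p.2 = "gateway"
    · have hL : pvLayerOf p.2 = some (0, "Gateway_Layer") := by simp [pvLayerOf, hg]
      refine ⟨?_, ?_, ?_, ?_⟩ <;>
        (simp only [List.filterMap_cons, hL, Option.map_some];
         simp [List.filter_cons, hg, ih0, ih1, ih2, ih3])
    · by_cases hf : p.2 = "frontend"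
      · have hL : pvLayerOf p.2 = some (1, "Frontend_Layer") := by simp [pvLayerOf, hf, hg]
        refine ⟨?_, ?_, ?_, ?_⟩ <;>
          (simp only [List.filterMap_cons, hL, Option.map_some];
           simp [List.filter_cons, hf, hg, ih0, ih1, ih2, ih3])
      · by_cases hs : p.2 = "service" ∨ p.2 = "auth"
        · rcases hs with h | h <;>
            [(have hL : pvLayerOf p.2 = some (2, "Service_Layer") := by simp [pvLayerOf, h, hf, hg]);
             (have hL : pvLayerOf p.2 = some (2, "Service_Layer") := by simp [pvLayerOf, h, hf, hg])] <;>
            refine ⟨?_, ?_, ?_, ?_⟩ <;>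
            (simp only [List.filterMap_cons, hL, Option.map_some];
             simp [List.filter_cons, h, ih0, ih1, ih2, ih3])
        · push Not at hs
          by_cases hd : p.2 = "database" ∨ p.2 = "cache" ∨ p.2 = "queue"
          · rcases hd with h | h | h <;>
              (have hL : pvLayerOf p.2 = some (3, "Data_Layer") := by
                 simp [pvLayerOf, h, hs.1, hs.2, hf, hg]) <;>
              refine ⟨?_, ?_, ?_, ?_⟩ <;>
              (simp only [List.filterMap_cons, hL, Option.map_some];
               simp [List.filter_cons, h, ih0, ih1, ih2, ih3])
          · push Not at hd
            have hL : pvLayerOf p.2 = none := by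
              simp [pvLayerOf, hd.1, hd.2.1, hd.2.2, hs.1, hs.2, hf, hg]
            refine ⟨?_, ?_, ?_, ?_⟩ <;>
              (simp only [List.filterMap_cons, hL, Option.map_none];
               simp [List.filter_cons, hd.1, hd.2.1, hd.2.2, hs.1, hs.2, hf, hg,
                 ih0, ih1, ih2, ih3])

-- scanning a group whose rank equals prev only appends component lines
theorem pv_scan_same (names : List String) (r : Int) (L : String) (acc : List String) :
    (names.map (fun n => ((r, L), n))).foldl pvScanStep (acc, some r) =
      (acc ++ names.map pvCompLine, some r) := by
  induction names generalizing acc with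
  | nil => simp
  | cons n rest ih => simp [pvScanStep] at ih ⊢; simp [ih]

-- scanning a nonempty group from a different prev closes, opens the subgraph, lists the names
theorem pv_scan_group (names : List String) (hne : names ≠ []) (r : Int) (L : String)
    (p : Option Int) (hp : p ≠ some r) (acc : List String) :
    (names.map (fun n => ((r, L), n))).foldl pvScanStep (acc, p) =
      (pvClose p acc ++ ("    subgraph " ++ L) :: names.map pvCompLine, some r) := by
  cases names with
  | nil => exact absurd rfl hne
  | cons n rest =>
    have h1 : pvScanStep (acc, p) ((r, L), n) =
        (pvClose p acc ++ ["    subgraph " ++ L, pvCompLine n], some r) := by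
      simp [pvScanStep, hp]
    simp only [List.map_cons, List.foldl_cons]
    rw [h1, pv_scan_same]
    simp

-- ===== VERDICT =====
theorem fallback_mermaid_generation_py_spec : Claim_equal_fallback_mermaid_generation_py := by
  intro components relationships _
  unfold Spec_fallback_mermaid_generation_py
  simp only [fallback_mermaid_generation_py, fallback_mermaid_generation_py_alt]
  obtain ⟨h0, h1, h2, h3⟩ := pv_keyed_filters (PySem.Dict.ofList components).items
  rw [pv_sorted_groups _ (pv_keyed_ranks (PySem.Dict.ofList components).items), h0, h1, h2, h3]
  set g := ((PySem.Dict.ofList components).items.filter (fun p => p.2 == "gateway")).map (·.1) with hgdef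
  set f := ((PySem.Dict.ofList components).items.filter (fun p => p.2 == "frontend")).map (·.1) with hfdef
  set s := ((PySem.Dict.ofList components).items.filter (fun p => p.2 == "service" || p.2 == "auth")).map (·.1) with hsdef
  set d := ((PySem.Dict.ofList components).items.filter (fun p => p.2 == "database" || p.2 == "cache" || p.2 == "queue")).map (·.1) with hddef
  congr 1
  by_cases hG : g = [] <;> by_cases hF : f = [] <;> by_cases hS : s = [] <;> by_cases hD : d = [] <;>
    simp only [hG, hF, hS, hD, List.map_nil, List.nil_append, List.append_nil,
      List.foldl_append, List.foldl_nil, if_true, if_false, reduceIte] <;>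
    first
    | (simp [pvClose]; done)
    | (repeat first
        | rw [pv_scan_group g hG 0 "Gateway_Layer" none (by decide) _]
        | rw [pv_scan_group f hF 1 "Frontend_Layer" none (by decide) _]
        | rw [pv_scan_group f hF 1 "Frontend_Layer" (some 0) (by decide) _]
        | rw [pv_scan_group s hS 2 "Service_Layer" none (by decide) _]
        | rw [pv_scan_group s hS 2 "Service_Layer" (some 0) (by decide) _]
        | rw [pv_scan_group s hS 2 "Service_Layer" (some 1) (by decide) _]
        | rw [pv_scan_group d hD 3 "Data_Layer" none (by decide) _]
        | rw [pv_scan_group d hD 3 "Data_Layer" (some 0) (by decide) _]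
        | rw [pv_scan_group d hD 3 "Data_Layer" (some 1) (by decide) _]
        | rw [pv_scan_group d hD 3 "Data_Layer" (some 2) (by decide) _]) <;>
      simp [pvClose, hG, hF, hS, hD]
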